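-- pv_equiv track=rewrite | github.com/avenet/hackerrank | contests/week_of_code_35/lucky_purchase.py | is_valid_price
-- ===== SOURCE A (Python) =====
-- def is_valid_price(price):
--     fours = 0
--     sevens = 0
--
--     for c in str(price):
--         if c == '4':
--             fours += 1
--         elif c == '7':
--             sevens += 1
--         else:
--             return False
--
--     return fours == sevens
-- ===== SOURCE B (Python) =====
-- def is_valid_price(price):
--     s = sorted(str(price))
--     half, odd = divmod(len(s), 2)
--     return not odd and s == ['4'] * half + ['7'] * half
-- ===== Notes on version B (the rewrite author's own statement) =====
-- stated objective: alternative
-- what changed: Instead of scanning and counting digits, B sorts the string once and compares it to the canonical lucky form ['4']*half + ['7']*half, so validity is a single structural equality with the normal form rather than any per-character accumulation or counting.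
import Mathlib
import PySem

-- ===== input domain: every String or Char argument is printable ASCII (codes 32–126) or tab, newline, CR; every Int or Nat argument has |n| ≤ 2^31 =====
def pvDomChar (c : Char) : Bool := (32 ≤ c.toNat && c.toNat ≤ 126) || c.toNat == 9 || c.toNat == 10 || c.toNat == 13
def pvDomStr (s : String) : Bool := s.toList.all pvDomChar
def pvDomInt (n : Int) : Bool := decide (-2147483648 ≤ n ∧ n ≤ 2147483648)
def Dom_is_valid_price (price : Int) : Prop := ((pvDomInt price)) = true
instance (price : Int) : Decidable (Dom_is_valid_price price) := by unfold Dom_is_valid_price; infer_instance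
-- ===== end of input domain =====

-- B sorts the digits once and compares with the canonical form '4'*half ++ '7'*half instead of counting; alternative formulation, same cost class.
-- ===== PORT A =====
-- A's for-loop with early 'return False': structural recursion carrying the two counters.
def isValidPriceLoop : List Char → Int → Int → Bool
  | [], fours, sevens => fours == sevens
  | c :: cs, fours, sevens =>
    if c == '4' then isValidPriceLoop cs (fours + 1) sevens
    else if c == '7' then isValidPriceLoop cs fours (sevens + 1)
    else false

def is_valid_price (price : Int) : Bool :=
  isValidPriceLoop (PySem.Int.toStr price).toList 0 0

-- ===== PORT B =====
def is_valid_price_alt (price : Int) : Bool :=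
  let s := PySem.List.sorted (PySem.Int.toStr price).toList (fun x => x) false
  -- half, odd = divmod(len(s), 2): len(s) ≥ 0, so Nat / and % match Python's divmod exactly
  let half := s.length / 2
  let odd := s.length % 2
  odd == 0 && s == List.replicate half '4' ++ List.replicate half '7'

-- ===== PRECONDITION & SPEC =====
def Spec_is_valid_price (price : Int) (out : Bool) : Prop := out = is_valid_price_alt price
instance (price : Int) (out : Bool) : Decidable (Spec_is_valid_price price out) := by unfold Spec_is_valid_price; infer_instance

-- ===== CLAIM =====
def Claim_equal_is_valid_price : Prop := ∀ (price : Int), Dom_is_valid_price price → Spec_is_valid_price price (is_valid_price price)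

-- ===== LEMMAS AND PROOFS =====
-- A's loop equals "all chars in {4,7} and fours+count4 = sevens+count7"
theorem isValidPriceLoop_eq (l : List Char) (f s : Int) :
    isValidPriceLoop l f s =
      (l.all (fun c => c == '4' || c == '7') &&
        (f + (l.count '4' : Int) == s + (l.count '7' : Int))) := by
  induction l generalizing f s with
  | nil => simp [isValidPriceLoop]
  | cons c cs ih =>
    by_cases h4 : c = '4'
    · subst h4
      simp [isValidPriceLoop, ih]
      ring_nf
    · by_cases h7 : c = '7'
      · subst h7
        simp [isValidPriceLoop, h4, ih]
        ring_nf
      · simp [isValidPriceLoop, h4, h7]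

-- a list whose chars are all '4'/'7' has length count4 + count7
theorem len_eq_counts (l : List Char)
    (h : l.all (fun c => c == '4' || c == '7') = true) :
    l.length = l.count '4' + l.count '7' := by
  induction l with
  | nil => simp
  | cons c cs ih =>
    simp only [List.all_cons, Bool.and_eq_true, Bool.or_eq_true, beq_iff_eq] at h
    obtain ⟨h47, hall⟩ := h
    rcases h47 with h4 | h7 <;> subst_vars <;>
      simp [ih hall] <;> omega

def canon (k : Nat) : List Char := List.replicate k '4' ++ List.replicate k '7'

theorem canon_pairwise (k : Nat) : (canon k).Pairwise (· ≤ ·) := by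
  unfold canon
  rw [List.pairwise_append]
  refine ⟨List.pairwise_replicate.mpr (by simp), List.pairwise_replicate.mpr (by simp), ?_⟩
  intro a ha b hb
  rw [List.eq_of_mem_replicate ha, List.eq_of_mem_replicate hb]
  decide

theorem canon_count (k : Nat) (a : Char) :
    (canon k).count a = if a = '4' then k else if a = '7' then k else 0 := by
  unfold canon
  have h47 : ('4' : Char) ≠ '7' := by decide
  by_cases h4 : a = '4'
  · subst h4
    simp [List.count_append, List.count_replicate]
  · by_cases h7 : a = '7'
    · subst h7
      simp [List.count_append, List.count_replicate, h4]
    · simp [List.count_append, List.count_replicate, h4, h7, Ne.symm h4, Ne.symm h7]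

-- core characterisation: the count condition ↔ the sorted-canonical condition
theorem key_iff (l : List Char) :
    (l.all (fun c => c == '4' || c == '7') = true ∧ l.count '4' = l.count '7') ↔
    (l.length % 2 = 0 ∧ PySem.List.sorted l (fun x => x) false =
      List.replicate (l.length / 2) '4' ++ List.replicate (l.length / 2) '7') := by
  show _ ↔ (_ ∧ _ = canon (l.length / 2))
  constructor
  · rintro ⟨hall, hcnt⟩
    have hlen := len_eq_counts l hall
    have hk : l.length = 2 * l.count '4' := by omega
    have hperm : (canon (l.count '4')).Perm l := by
      rw [List.perm_iff_count]
      intro a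
      rw [canon_count]
      split_ifs with h4 h7
      · subst h4; rfl
      · subst h7; omega
      · symm
        rw [List.count_eq_zero]
        intro ha
        have := List.all_eq_true.mp hall a ha
        simp at this
        tauto
    have := PySem.List.sorted_id_eq_of_perm_of_pairwise l (canon (l.count '4')) hperm (canon_pairwise _)
    refine ⟨by omega, ?_⟩
    rw [this]
    congr 1
    omega
  · rintro ⟨heven, hsort⟩
    have hperm : l.Perm (canon (l.length / 2)) := by
      have := PySem.List.sorted_perm l (fun x => x) false
      rw [hsort] at this
      exact this.symm
    constructor
    · rw [List.all_eq_true]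
      intro a ha
      have : a ∈ canon (l.length / 2) := hperm.mem_iff.mp ha
      unfold canon at this
      rcases List.mem_append.mp this with h | h <;>
        rw [List.eq_of_mem_replicate h] <;> simp
    · have h4 := hperm.count_eq '4'
      have h7 := hperm.count_eq '7'
      rw [canon_count] at h4 h7
      simp at h4 h7
      omega

-- ===== VERDICT =====
theorem is_valid_price_spec : Claim_equal_is_valid_price := by
  intro price _
  unfold Spec_is_valid_price is_valid_price is_valid_price_alt
  rw [isValidPriceLoop_eq, Bool.eq_iff_iff]
  simp only [Bool.and_eq_true, beq_iff_eq, zero_add, Nat.cast_inj, PySem.List.length_sorted]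
  exact key_iff _
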